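-- pv_equiv track=rewrite | github.com/Shilenkovv/Algorithms_PyGen_bg | 10_Optimization_methods_for_problem_solving/10_1_4.py | difference_list
-- ===== SOURCE A (Python) =====
-- def difference_list(nums: list[int]) -> list[int]:
--     prefix_sum = [0] * (len(nums) + 1)
--     for i in range(len(nums)):
--         prefix_sum[i + 1] = prefix_sum[i] + nums[i]
--
--     ans = []
--     for i in range(1, len(prefix_sum)):
--         ans.append(abs(prefix_sum[i - 1] - (prefix_sum[-1] - prefix_sum[i])))
--     return ans
-- ===== SOURCE B (Python) =====
-- def difference_list(nums: list[int]) -> list[int]: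
--     # Maintain the SIGNED difference d_i = leftsum_i - rightsum_i directly:
--     # d_0 = nums[0] - total, and telescoping gives d_{i+1} = d_i + nums[i] + nums[i+1],
--     # so no prefix/left sum is ever kept -- only the answer quantity itself.
--     if not nums:
--         return []
--     d = nums[0] - sum(nums)
--     ans = [abs(d)]
--     for prev, cur in zip(nums, nums[1:]):
--         d += prev + cur
--         ans.append(abs(d))
--     return ans
-- ===== Notes on version B (the rewrite author's own statement) =====
-- stated objective: alternative
-- what changed: Instead of A's prefix-sum table plus a second index loop, B maintains the signed left-minus-right difference itself, seeding it with the first element minus the total and updating it by a telescoping recurrence that adds each adjacent pair; no prefix or left sum is ever kept.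
import Mathlib
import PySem

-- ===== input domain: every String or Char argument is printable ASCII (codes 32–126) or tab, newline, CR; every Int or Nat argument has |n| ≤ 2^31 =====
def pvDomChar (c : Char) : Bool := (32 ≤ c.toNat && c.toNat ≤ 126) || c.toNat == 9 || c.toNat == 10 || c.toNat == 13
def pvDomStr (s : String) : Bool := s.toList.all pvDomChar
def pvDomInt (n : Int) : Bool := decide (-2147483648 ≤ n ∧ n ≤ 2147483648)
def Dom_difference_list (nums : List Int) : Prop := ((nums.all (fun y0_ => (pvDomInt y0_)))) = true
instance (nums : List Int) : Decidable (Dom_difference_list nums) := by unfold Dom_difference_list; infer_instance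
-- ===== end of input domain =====

-- B drops A's prefix-sum table entirely: it maintains the signed left−right difference
-- itself via the telescoping recurrence d += nums[i] + nums[i+1]; objective: alternative.

-- ===== PORT A =====
-- prefix_sum = [0]*(n+1); for i in range(n): prefix_sum[i+1] = prefix_sum[i] + nums[i]
-- All list indices in A are in range, so `getD _ 0` is exact; prefix_sum[-1] is
-- modelled as index (length - 1), exact since the list is nonempty.
def difference_list (nums : List Int) : List Int :=
  let ps := (List.range nums.length).foldl
    (fun ps i => ps.set (i + 1) (ps.getD i 0 + nums.getD i 0))
    (List.replicate (nums.length + 1) 0)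
  (List.range' 1 (ps.length - 1)).foldl
    (fun ans i => ans ++ [|ps.getD (i - 1) 0 - (ps.getD (ps.length - 1) 0 - ps.getD i 0)|]) []

-- ===== PORT B =====
-- `sum(nums)` is ported as List.sum; the loop over `zip(nums, nums[1:])` is the foldl
-- over `List.zip nums nums.tail` with state (ans, d).
def difference_list_alt (nums : List Int) : List Int :=
  match nums with
  | [] => []
  | x :: _ =>
    let d0 := x - nums.sum
    ((List.zip nums nums.tail).foldl
      (fun (p : List Int × Int) q =>
        let d' := p.2 + q.1 + q.2
        (p.1 ++ [|d'|], d'))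
      ([|d0|], d0)).1

-- ===== PRECONDITION & SPEC =====
def Spec_difference_list (nums : List Int) (out : List Int) : Prop := out = difference_list_alt nums
instance (nums : List Int) (out : List Int) : Decidable (Spec_difference_list nums out) := by unfold Spec_difference_list; infer_instance

-- ===== CLAIM (what is proved, stated in full; the proofs are below) =====
def Claim_equal_difference_list : Prop := ∀ (nums : List Int), Dom_difference_list nums → Spec_difference_list nums (difference_list nums)

-- ===== LEMMAS AND PROOFS =====

/-- The prefix-sum list A builds: `a, a+x₁, a+x₁+x₂, …`. -/
def prefAux (a : Int) : List Int → List Int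
  | [] => [a]
  | x :: xs => a :: prefAux (a + x) xs

/-- Reference value: the per-position |left − right| list. -/
def specGo (total left : Int) : List Int → List Int
  | [] => []
  | x :: xs => |left - (total - left - x)| :: specGo total (left + x) xs

/-- The |d|-values B emits while folding over the remaining pairs. -/
def dgo (d : Int) : List (Int × Int) → List Int
  | [] => []
  | q :: qs => |d + q.1 + q.2| :: dgo (d + q.1 + q.2) qs

theorem prefAux_length (a : Int) (xs : List Int) : (prefAux a xs).length = xs.length + 1 := by
  induction xs generalizing a with
  | nil => rfl
  | cons x xs ih => simp [prefAux, ih]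

theorem prefAux_getD (a : Int) (xs : List Int) (j : Nat) (h : j ≤ xs.length) :
    (prefAux a xs).getD j 0 = a + (xs.take j).sum := by
  induction xs generalizing a j with
  | nil =>
    cases j with
    | zero => simp [prefAux]
    | succ j => simp at h
  | cons x xs ih =>
    cases j with
    | zero => simp [prefAux]
    | succ j =>
      simp only [prefAux, List.getD_cons_succ, List.take_succ_cons, List.sum_cons]
      rw [ih (a + x) j (by simpa using h)]; ring

theorem prefAux_snoc (a : Int) (xs : List Int) (x : Int) :
    prefAux a (xs ++ [x]) = prefAux a xs ++ [a + xs.sum + x] := by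
  induction xs generalizing a with
  | nil => simp [prefAux]
  | cons y ys ih => simp [prefAux, ih]; ring_nf

/-- Invariant of A's first loop: after `k` steps the array holds the first `k+1`
prefix sums followed by the untouched zeros. -/
theorem buildPrefix_inv (nums : List Int) (k : Nat) (h : k ≤ nums.length) :
    (List.range k).foldl
      (fun ps i => ps.set (i + 1) (ps.getD i 0 + nums.getD i 0))
      (List.replicate (nums.length + 1) 0)
    = prefAux 0 (nums.take k) ++ List.replicate (nums.length - k) 0 := by
  induction k with
  | zero =>
    simp [prefAux]
    cases hn : nums.length with
    | zero => simp
    | succ m => simp [List.replicate_succ]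
  | succ k ih =>
    have hk : k ≤ nums.length := Nat.le_of_succ_le h
    have hklt : k < nums.length := h
    rw [List.range_succ, List.foldl_append, ih hk]
    have hL : (prefAux 0 (nums.take k)).length = k + 1 := by
      rw [prefAux_length, List.length_take, Nat.min_eq_left hk]
    simp only [List.foldl_cons, List.foldl_nil]
    have hget : (prefAux 0 (nums.take k) ++ List.replicate (nums.length - k) 0).getD k 0
        = (nums.take k).sum := by
      rw [List.getD_append _ _ _ _ (by omega),
        prefAux_getD 0 (nums.take k) k (by rw [List.length_take]; omega)]
      simp [List.take_take]
    rw [hget, List.set_append, if_neg (by omega), hL]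
    have hrep : List.replicate (nums.length - k) (0 : Int)
        = 0 :: List.replicate (nums.length - (k + 1)) 0 := by
      have : nums.length - k = (nums.length - (k + 1)) + 1 := by omega
      rw [this, List.replicate_succ]
    rw [hrep]
    have htk : nums.take (k + 1) = nums.take k ++ [nums.getD k 0] := by
      rw [List.take_add_one]
      congr 1
      simp [List.getElem?_eq_getElem hklt]
    rw [htk, prefAux_snoc]
    simp

theorem specGo_eq_map (total : Int) (xs : List Int) (left : Int) :
    specGo total left xs
    = (List.range xs.length).map
        (fun j => |left + (xs.take j).sum - (total - (left + (xs.take (j + 1)).sum))|) := by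
  induction xs generalizing left with
  | nil => rfl
  | cons x xs ih =>
    simp only [specGo, List.length_cons, List.range_succ_eq_map, List.map_cons, List.map_map]
    congr 1
    · simp; ring_nf
    · rw [ih (left + x)]
      apply List.map_congr_left
      intro j _
      simp [Function.comp, List.take_succ_cons]
      ring_nf

/-- A's result is the reference list `specGo total 0 nums`. -/
theorem a_eq_specGo (nums : List Int) :
    difference_list nums = specGo nums.sum 0 nums := by
  unfold difference_list
  rw [buildPrefix_inv nums nums.length (le_refl _)]
  simp only [Nat.sub_self, List.replicate_zero, List.append_nil, List.take_length]
  rw [PySem.List.foldl_append_singleton_eq_map, List.nil_append, prefAux_length]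
  simp only [Nat.add_sub_cancel]
  rw [List.range'_eq_map_range, List.map_map, specGo_eq_map]
  apply List.map_congr_left
  intro j hj
  have hjn : j < nums.length := List.mem_range.mp hj
  simp only [Function.comp]
  have h1 : 1 + j - 1 = j := by omega
  rw [h1]
  rw [prefAux_getD 0 nums j (by omega), prefAux_getD 0 nums nums.length (by omega),
    prefAux_getD 0 nums (1 + j) (by omega)]
  simp only [List.take_length]
  have : 1 + j = j + 1 := by omega
  rw [this]
  ring_nf

theorem alt_loop (ps : List (Int × Int)) (acc : List Int) (d : Int) :
    (ps.foldl
      (fun (p : List Int × Int) q =>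
        let d' := p.2 + q.1 + q.2
        (p.1 ++ [|d'|], d'))
      (acc, d)).1 = acc ++ dgo d ps := by
  induction ps generalizing acc d with
  | nil => simp [dgo]
  | cons q qs ih => simp [dgo, ih]

theorem dgo_eq_specGo (total : Int) (ys : List Int) :
    ∀ (left y : Int),
      dgo (2 * left + y - total) (List.zip (y :: ys) ys) = specGo total (left + y) ys := by
  induction ys with
  | nil => intro left y; simp [dgo, specGo]
  | cons z zs ih =>
    intro left y
    simp only [List.zip_cons_cons, dgo, specGo]
    rw [show 2 * left + y - total + y + z = 2 * (left + y) + z - total from by ring,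
      ih (left + y) z]
    congr 2
    ring

-- ===== VERDICT (by name: the statement is the Claim_ definition above) =====
theorem difference_list_spec : Claim_equal_difference_list := by
  intro nums _
  unfold Spec_difference_list
  rw [a_eq_specGo]
  cases nums with
  | nil => simp [specGo, difference_list_alt]
  | cons x xs =>
    unfold difference_list_alt
    simp only [List.tail_cons]
    rw [alt_loop]
    rw [show x - (x :: xs).sum = 2 * 0 + x - (x :: xs).sum from by ring,
      dgo_eq_specGo ((x :: xs).sum) xs 0 x]
    simp only [specGo, zero_add]
    congr 2
    ring
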